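-- pv_equiv track=rewrite | github.com/yifan19860831-hub/rustchain-bounties | bounties/331-ibm-7094-miner/simulation/ibm7094_miner.py | _pack_wallet_address
-- ===== SOURCE A (Python) =====
-- def _pack_wallet_address(address):
--     """Pack wallet address string into 36-bit words"""
--     # Each 36-bit word can hold 6 characters (6-bit BCD)
--     words = []
--     for i in range(0, len(address), 6):
--         chunk = address[i:i+6]
--         word = 0
--         for j, char in enumerate(chunk):
--             # Simple ASCII to 6-bit encoding (simplified)
--             char_code = ord(char) & 0x3F
--             word |= (char_code << (30 - j * 6))
--         words.append(word)
--     return words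
-- ===== SOURCE B (Python) =====
-- def _pack_wallet_address(address):
--     """Pack wallet address string into 36-bit words (flat single pass)."""
--     words = []
--     word = 0
--     j = 0
--     for char in address:
--         word |= (ord(char) & 0x3F) << (30 - j * 6)
--         j += 1
--         if j == 6:
--             words.append(word)
--             word = 0
--             j = 0
--     if j > 0:
--         words.append(word)
--     return words
-- ===== Notes on version B (the rewrite author's own statement) =====
-- stated objective: alternative
-- what changed: Replaces the nested chunk-then-enumerate loops (range/slice per 6-char chunk) with one flat pass over the characters that keeps a running word and in-word index, flushing at each 6-character boundary and once more for a trailing partial word.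
import Mathlib
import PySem

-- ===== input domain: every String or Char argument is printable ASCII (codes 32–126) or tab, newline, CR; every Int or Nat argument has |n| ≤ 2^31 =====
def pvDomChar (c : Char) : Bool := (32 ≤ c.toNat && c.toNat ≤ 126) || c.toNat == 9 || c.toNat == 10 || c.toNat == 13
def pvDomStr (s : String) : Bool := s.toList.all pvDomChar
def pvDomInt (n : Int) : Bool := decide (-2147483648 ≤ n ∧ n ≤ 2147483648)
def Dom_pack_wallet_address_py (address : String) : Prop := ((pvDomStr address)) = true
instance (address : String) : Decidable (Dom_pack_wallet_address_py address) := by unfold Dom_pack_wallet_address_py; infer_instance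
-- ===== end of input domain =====

-- B replaces A's nested chunk-then-enumerate loops by one flat pass with a running word
-- and an in-word index, flushing at 6-character boundaries (alternative decomposition).

-- ===== PORT A =====
def pack_wallet_address_py (address : String) : List Int :=
  (PySem.List.pyRange 0 (PySem.Str.len address) 6).foldl
    (fun words i =>
      let chunk := PySem.Str.slice address (some i) (some (i + 6))
      let word := (PySem.List.enumerate chunk.toList).foldl
        (fun w jc =>
          PySem.Int.bor w ((PySem.Int.band (Int.ofNat jc.2.toNat) 0x3F) <<< (30 - jc.1 * 6)))
        0
      words ++ [word])
    []

-- ===== PORT B =====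
def pack_wallet_address_py_alt (address : String) : List Int :=
  let st := address.toList.foldl
    (fun (st : List Int × Int × Int) c =>
      let word := PySem.Int.bor st.2.1
        ((PySem.Int.band (Int.ofNat c.toNat) 0x3F) <<< (30 - st.2.2 * 6))
      let j := st.2.2 + 1
      if j == 6 then (st.1 ++ [word], 0, 0) else (st.1, word, j))
    ([], 0, 0)
  if st.2.2 > 0 then st.1 ++ [st.2.1] else st.1

-- ===== PRECONDITION & SPEC =====
def Spec_pack_wallet_address_py (address : String) (out : List Int) : Prop := out = pack_wallet_address_py_alt address
instance (address : String) (out : List Int) : Decidable (Spec_pack_wallet_address_py address out) := by unfold Spec_pack_wallet_address_py; infer_instance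

-- ===== CLAIM (what is proved, stated in full; the proofs are below) =====
def Claim_equal_pack_wallet_address_py : Prop := ∀ (address : String), Dom_pack_wallet_address_py address → Spec_pack_wallet_address_py address (pack_wallet_address_py address)

-- ===== LEMMAS AND PROOFS =====

-- A's inner loop: pack one chunk into a word.
def pvPackWord (cs : List Char) : Int :=
  (PySem.List.enumerate cs).foldl
    (fun w jc =>
      PySem.Int.bor w ((PySem.Int.band (Int.ofNat jc.2.toNat) 0x3F) <<< (30 - jc.1 * 6)))
    0

-- Common recursive characterisation: pack 6-char chunks front to back.
def pvChunks (l : List Char) : List Int :=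
  if h : l = [] then [] else pvPackWord (l.take 6) :: pvChunks (l.drop 6)
termination_by l.length
decreasing_by
  have : l.length ≠ 0 := fun h0 => h (List.eq_nil_of_length_eq_zero h0)
  simp; omega

-- B's loop body and postprocessing, named for the proofs.
def pvStep (st : List Int × Int × Int) (c : Char) : List Int × Int × Int :=
  let word := PySem.Int.bor st.2.1
    ((PySem.Int.band (Int.ofNat c.toNat) 0x3F) <<< (30 - st.2.2 * 6))
  let j := st.2.2 + 1
  if j == 6 then (st.1 ++ [word], 0, 0) else (st.1, word, j)

def pvFinish (st : List Int × Int × Int) : List Int :=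
  if st.2.2 > 0 then st.1 ++ [st.2.1] else st.1

theorem pvChunks_nil : pvChunks [] = [] := by rw [pvChunks]; simp

theorem pvChunks_cons (c : Char) (t : List Char) :
    pvChunks (c::t) = pvPackWord ((c::t).take 6) :: pvChunks ((c::t).drop 6) := by
  rw [pvChunks]; simp

theorem pvA_map (l : List Char) (m : Nat)
    (hm : m = if (0:Int) < (l.length:Int) then (((l.length:Int) + 5) / 6).toNat else 0) :
    (List.range m).map (fun k => pvPackWord ((l.drop (6*k)).take 6)) = pvChunks l := by
  induction m generalizing l with
  | zero =>
      have hnil : l = [] := by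
        by_cases h : l = []
        · exact h
        · exfalso
          have hl : (0:Int) < (l.length:Int) := by
            have := List.length_pos_iff.mpr h; exact_mod_cast this
          rw [if_pos hl] at hm
          omega
      subst hnil; rw [pvChunks_nil]; simp
  | succ m ih =>
      have hne : l ≠ [] := by
        intro h; subst h; simp at hm
      have hl : (0:Int) < (l.length:Int) := by
        have := List.length_pos_iff.mpr hne; exact_mod_cast this
      rw [if_pos hl] at hm
      rw [pvChunks, dif_neg hne, List.range_succ_eq_map]
      simp only [List.map_cons, List.map_map, Nat.mul_zero, List.drop_zero]
      congr 1
      have hcond : m = if (0:Int) < ((l.drop 6).length:Int)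
          then ((((l.drop 6).length:Int) + 5) / 6).toNat else 0 := by
        simp only [List.length_drop]
        split_ifs with h
        · push_cast at h ⊢
          omega
        · push_cast at h
          omega
      rw [← ih (l.drop 6) hcond]
      apply List.map_congr_left
      intro k _
      simp only [Function.comp]
      rw [List.drop_drop, show 6 * Nat.succ k = 6 + 6 * k from by omega]

theorem pvA_eq (s : String) : pack_wallet_address_py s = pvChunks s.toList := by
  unfold pack_wallet_address_py
  rw [PySem.Str.len_eq, PySem.List.pyRange_of_pos _ _ (by norm_num : (0:Int) < 6)]
  rw [List.foldl_map, PySem.List.foldl_append_singleton_eq_map]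
  rw [List.nil_append]
  have hm : (if (0:Int) < (s.toList.length:Int) then (((s.toList.length:Int) - 0 + 6 - 1) / 6).toNat else 0)
      = (if (0:Int) < (s.toList.length:Int) then (((s.toList.length:Int) + 5) / 6).toNat else 0) := by
    split_ifs <;> omega
  rw [hm, ← pvA_map s.toList _ rfl]
  apply List.map_congr_left
  intro k _
  show pvPackWord (PySem.Str.slice s (some (0 + 6 * (k:Int))) (some (0 + 6 * (k:Int) + 6))).toList = _
  congr 1
  have h1 : (0 + 6 * (k:Int)) = ((6*k : Nat) : Int) := by push_cast; ring
  have h2 : ((6*k : Nat) : Int) + 6 = ((6*k + 6 : Nat) : Int) := by push_cast; ring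
  rw [h1, h2]
  show (String.ofList (PySem.List.slice s.toList (some ((6*k : Nat):Int)) (some ((6*k+6 : Nat):Int)))).toList = _
  rw [String.toList_ofList, PySem.List.slice_natCast]
  congr 1
  omega


theorem pvStep6 (ws : List Int) (a b c d e f : Char) (rest : List Char) :
    List.foldl pvStep (ws, 0, 0) (a::b::c::d::e::f::rest)
      = List.foldl pvStep (ws ++ [pvPackWord [a,b,c,d,e,f]], 0, 0) rest := by
  simp only [List.foldl_cons]
  congr 1

theorem pvB_loop (n : Nat) : ∀ (l : List Char) (ws : List Int), l.length ≤ n →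
    pvFinish (List.foldl pvStep (ws, 0, 0) l) = ws ++ pvChunks l := by
  induction n with
  | zero =>
      intro l ws h
      have : l = [] := List.eq_nil_of_length_eq_zero (Nat.le_zero.mp h)
      subst this
      simp [pvChunks_nil, pvFinish]
  | succ n ih =>
      intro l ws h
      match l with
      | [] => simp [pvChunks_nil, pvFinish]
      | [a] =>
          rw [pvChunks_cons]
          simp [pvChunks_nil, pvStep, pvFinish, pvPackWord, PySem.List.enumerate]
      | [a,b] =>
          rw [pvChunks_cons]
          simp [pvChunks_nil, pvStep, pvFinish, pvPackWord, PySem.List.enumerate]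
      | [a,b,c] =>
          rw [pvChunks_cons]
          simp [pvChunks_nil, pvStep, pvFinish, pvPackWord, PySem.List.enumerate]
      | [a,b,c,d] =>
          rw [pvChunks_cons]
          simp [pvChunks_nil, pvStep, pvFinish, pvPackWord, PySem.List.enumerate]
      | [a,b,c,d,e] =>
          rw [pvChunks_cons]
          simp [pvChunks_nil, pvStep, pvFinish, pvPackWord, PySem.List.enumerate]
      | a::b::c::d::e::f::rest =>
          rw [pvStep6]
          have hr : rest.length ≤ n := by
            simp at h; omega
          rw [ih rest _ hr, pvChunks_cons]
          simp

theorem pvB_eq (s : String) : pack_wallet_address_py_alt s = pvChunks s.toList := by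
  have : pack_wallet_address_py_alt s
      = pvFinish (List.foldl pvStep ([], 0, 0) s.toList) := rfl
  rw [this, pvB_loop s.toList.length s.toList [] le_rfl, List.nil_append]

-- ===== VERDICT (by name: the statement is the Claim_ definition above) =====
theorem pack_wallet_address_py_spec : Claim_equal_pack_wallet_address_py := by
  intro address _
  unfold Spec_pack_wallet_address_py
  rw [pvA_eq, pvB_eq]
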